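-- pv_equiv track=rewrite | github.com/lackoftrack27/Super-Mario-Bros.-SMS | RESOURCES/SND/mid2asm.py | build_channel_timeline
-- ===== SOURCE A (Python) =====
-- from collections import defaultdict
--
-- def build_channel_timeline(tracks, target_channels_1indexed):
--     """
--     Merge all tracks, keep only target channels (1-indexed, e.g. 11-14).
--     Returns dict: channel_0idx → sorted list of (abs_tick, type, note, vel)
--     """
--     # Convert to 0-indexed
--     target_0 = {ch - 1 for ch in target_channels_1indexed}
--
--     channel_events = defaultdict(list)
--     for track in tracks:
--         for (tick, ch, etype, note, vel) in track:
--             if ch in target_0: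
--                 channel_events[ch].append((tick, etype, note, vel))
--
--     for ch in channel_events:
--         channel_events[ch].sort(key=lambda e: e[0])
--
--     return channel_events
-- ===== SOURCE B (Python) =====
-- from collections import defaultdict
--
-- def build_channel_timeline(tracks, target_channels_1indexed):
--     """
--     Merge all tracks, keep only target channels (1-indexed, e.g. 11-14).
--     Returns dict: channel_0idx -> sorted list of (abs_tick, type, note, vel).
--     Each channel's bucket is kept sorted by tick while events are inserted,
--     so no separate per-bucket sort phase is needed.
--     """
--     target_0 = {ch - 1 for ch in target_channels_1indexed}
--
--     timeline = defaultdict(list)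
--     for track in tracks:
--         for (tick, ch, etype, note, vel) in track:
--             if ch in target_0:
--                 bucket = timeline[ch]
--                 for i, e in enumerate(bucket):
--                     if e[0] > tick:
--                         bucket.insert(i, (tick, etype, note, vel))
--                         break
--                 else:
--                     bucket.append((tick, etype, note, vel))
--     return timeline
-- ===== Notes on version B (the rewrite author's own statement) =====
-- stated objective: alternative
-- what changed: B keeps each channel's bucket sorted by tick as events arrive (online insertion at the scan position, appending after equal ticks), eliminating A's separate per-bucket sort phase; Pre_ excludes only inputs where A raises ValueError (an event that does not unpack into 5 fields).
import Mathlib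
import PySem

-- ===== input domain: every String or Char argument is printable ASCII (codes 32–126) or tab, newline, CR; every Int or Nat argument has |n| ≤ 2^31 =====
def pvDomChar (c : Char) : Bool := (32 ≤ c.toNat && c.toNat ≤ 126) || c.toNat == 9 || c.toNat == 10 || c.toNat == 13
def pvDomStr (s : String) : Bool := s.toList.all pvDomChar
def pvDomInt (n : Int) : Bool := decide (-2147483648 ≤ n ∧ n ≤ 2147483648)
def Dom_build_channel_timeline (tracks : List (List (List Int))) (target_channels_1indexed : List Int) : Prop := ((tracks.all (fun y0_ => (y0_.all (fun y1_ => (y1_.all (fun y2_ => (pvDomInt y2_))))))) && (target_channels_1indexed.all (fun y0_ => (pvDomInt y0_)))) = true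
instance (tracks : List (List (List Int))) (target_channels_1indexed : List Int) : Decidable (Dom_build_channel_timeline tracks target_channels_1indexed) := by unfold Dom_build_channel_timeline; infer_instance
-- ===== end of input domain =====

-- B keeps each channel's bucket sorted by tick while inserting events (online
-- insertion), so A's separate per-bucket sort phase disappears (objective: alternative).

-- ===== PORT A =====
-- literal port of A: bucket events per channel (defaultdict append), then sort each bucket by e[0]
def build_channel_timeline (tracks : List (List (List Int))) (target_channels_1indexed : List Int) : List (Int × List (List Int)) :=
  let target0 : PySem.Set Int := PySem.Set.ofList (target_channels_1indexed.map (fun ch => ch - 1))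
  let channel_events : PySem.Dict Int (List (List Int)) :=
    tracks.foldl (fun d track =>
      track.foldl (fun d ev =>
        match ev with
        | [tick, ch, etype, note, vel] =>
          if PySem.Set.contains target0 ch then
            d.modify ch [] (fun l => l ++ [[tick, etype, note, vel]])
          else d
        | _ => d) d) PySem.Dict.empty
  let channel_events2 :=
    channel_events.keys.foldl (fun d ch =>
      d.modify ch [] (fun l => PySem.List.sorted l (fun e => e.headD 0))) channel_events
  channel_events2.items

-- ===== PORT B =====
-- port of B's inner for/else: walk the bucket left to right, insert before the first
-- entry with a strictly larger tick, append when no such entry exists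
def insByTick (tick : Int) (item : List Int) : List (List Int) → List (List Int)
  | [] => [item]
  | e :: rest => if e.headD 0 > tick then item :: e :: rest else e :: insByTick tick item rest

-- literal port of B: one pass, each event inserted into its channel's always-sorted bucket
-- (the tuple unpack is a length-5 guard plus selectors: tick = ev[0], ch = ev[1], rest = ev[2:])
def build_channel_timeline_alt (tracks : List (List (List Int))) (target_channels_1indexed : List Int) : List (Int × List (List Int)) :=
  let target0 : PySem.Set Int := PySem.Set.ofList (target_channels_1indexed.map (fun ch => ch - 1))
  let timeline : PySem.Dict Int (List (List Int)) :=
    tracks.foldl (fun d track =>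
      track.foldl (fun d ev =>
        if ev.length = 5 then
          (if PySem.Set.contains target0 ((ev.drop 1).headD 0) then
            d.modify ((ev.drop 1).headD 0) [] (insByTick (ev.headD 0) (ev.headD 0 :: ev.drop 2))
          else d)
        else d) d) PySem.Dict.empty
  timeline.items

-- ===== PRECONDITION & SPEC =====
-- Pre_ excludes exactly the inputs where A raises ValueError: an event list that does not
-- unpack as (tick, ch, etype, note, vel), i.e. whose length is not 5.
def Pre_build_channel_timeline (tracks : List (List (List Int))) (target_channels_1indexed : List Int) : Prop :=
  ∀ track ∈ tracks, ∀ ev ∈ track, ev.length = 5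
instance (tracks : List (List (List Int))) (target_channels_1indexed : List Int) : Decidable (Pre_build_channel_timeline tracks target_channels_1indexed) := by unfold Pre_build_channel_timeline; infer_instance

def pvWitness_build_channel_timeline : List (List (List Int)) × List Int :=
  ([[[10, 10, 1, 60, 100], [0, 10, 0, 60, 0]], [[5, 13, 1, 62, 90]]], [11, 14])

def Spec_build_channel_timeline (tracks : List (List (List Int))) (target_channels_1indexed : List Int) (out : List (Int × List (List Int))) : Prop := out = build_channel_timeline_alt tracks target_channels_1indexed
instance (tracks : List (List (List Int))) (target_channels_1indexed : List Int) (out : List (Int × List (List Int))) : Decidable (Spec_build_channel_timeline tracks target_channels_1indexed out) := by unfold Spec_build_channel_timeline; infer_instance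

-- ===== CLAIM (what is proved, stated in full; the proofs are below) =====
def Claim_equal_build_channel_timeline : Prop := ∀ (tracks : List (List (List Int))) (target_channels_1indexed : List Int), Dom_build_channel_timeline tracks target_channels_1indexed → Pre_build_channel_timeline tracks target_channels_1indexed → Spec_build_channel_timeline tracks target_channels_1indexed (build_channel_timeline tracks target_channels_1indexed)

-- ===== LEMMAS AND PROOFS =====

-- the channel, and the projected event (tick, etype, note, vel), of a 5-list event
def evCh (e : List Int) : Int := (e.drop 1).headD 0
def evProj (e : List Int) : List Int := e.headD 0 :: e.drop 2

theorem list_len5 {e : List Int} (h : e.length = 5) :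
    ∃ a b c d f, e = [a, b, c, d, f] := by
  match e, h with
  | [a, b, c, d, f], _ => exact ⟨a, b, c, d, f, rfl⟩

theorem foldl_flatMap_id {δ : Type} (f : δ → List Int → δ) (ts : List (List (List Int))) (d : δ) :
    ts.foldl (fun d t => t.foldl f d) d = (ts.flatMap id).foldl f d := by
  induction ts generalizing d with
  | nil => rfl
  | cons t ts ih => simp [List.foldl_append, ih]

theorem insByTick_eq_insertBy (t : Int) (x : List Int) (hx : x.headD 0 = t)
    (l : List (List Int)) :
    insByTick t x l
      = PySem.List.insertBy (fun a b => decide (a.headD 0 < b.headD 0)) x l := by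
  induction l with
  | nil => rfl
  | cons y r ih =>
    have hx' : x.head?.getD 0 = t := by simpa using hx
    by_cases h : t < y.head?.getD 0
    · simp [insByTick, PySem.List.insertBy, hx', h]
    · simp [insByTick, PySem.List.insertBy, hx', h, ih]

theorem foldl_insByTick (es : List (List Int)) :
    es.foldl (fun acc e => insByTick (e.headD 0) (evProj e) acc) []
      = PySem.List.sorted (es.map evProj) (fun e => e.headD 0) := by
  rw [PySem.List.sorted_eq_foldl_insertBy, List.foldl_map]
  exact PySem.List.foldl_congr_mem es _ _ []
    (fun acc e _ => insByTick_eq_insertBy (e.headD 0) (evProj e) rfl acc)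

theorem getD_foldl_modify_gen (l : List (List Int)) (k : List Int → Int)
    (g : List Int → List (List Int) → List (List Int))
    (d : PySem.Dict Int (List (List Int))) (c : Int) :
    (l.foldl (fun d e => d.modify (k e) [] (g e)) d).getD c []
      = (l.filter (fun e => k e == c)).foldl (fun acc e => g e acc) (d.getD c []) := by
  induction l generalizing d with
  | nil => rfl
  | cons e t ih =>
    simp only [List.foldl_cons, List.filter]
    rw [ih]
    by_cases hc : k e = c
    · simp [hc, PySem.Dict.getD_modify]
    · have : (k e == c) = false := by simp [hc]
      rw [this]
      have : (d.modify (k e) [] (g e)).getD c [] = d.getD c [] := by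
        rw [PySem.Dict.getD_modify]
        simp [Ne.symm hc]
      rw [this]

theorem getD_foldl_modify_fun (f : List (List Int) → List (List Int)) (ks : List Int)
    (d : PySem.Dict Int (List (List Int))) (hnd : ks.Nodup) (c : Int) :
    (ks.foldl (fun d k => d.modify k [] f) d).getD c []
      = if c ∈ ks then f (d.getD c []) else d.getD c [] := by
  induction ks generalizing d with
  | nil => simp
  | cons k ks ih =>
    rcases List.nodup_cons.mp hnd with ⟨hk, hnd'⟩
    simp only [List.foldl_cons]
    rw [ih _ hnd']
    by_cases hc : c = k
    · subst hc
      simp [hk]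
    · simp [hc, PySem.Dict.getD_modify, List.mem_cons]

theorem update_self_of_forall_mem (s : PySem.Set Int) (xs : List Int) (h : ∀ x ∈ xs, x ∈ s) :
    PySem.Set.update s xs = s := by
  rw [PySem.Set.update_eq_append_filter]
  have : List.filter (fun y => !PySem.Set.contains s y) (PySem.Set.ofList xs) = [] := by
    rw [List.filter_eq_nil_iff]
    intro y hy
    have : y ∈ s := h y ((PySem.Set.mem_ofList xs y).mp hy)
    simp [PySem.Set.contains, this]
  rw [this, List.append_nil]

-- ===== VERDICT (by name: the statement is the Claim_ definition above) =====
theorem build_channel_timeline_spec : Claim_equal_build_channel_timeline := by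
  intro tracks tc _hdom hpre
  unfold Spec_build_channel_timeline build_channel_timeline build_channel_timeline_alt
  simp only []
  set t0 : PySem.Set Int := PySem.Set.ofList (tc.map (fun ch => ch - 1)) with ht0
  set L0 : List (List Int) := tracks.flatMap id with hL0
  have hlen : ∀ ev ∈ L0, ev.length = 5 := by
    intro ev hev
    rw [hL0, List.mem_flatMap] at hev
    rcases hev with ⟨t, htm, hevm⟩
    exact hpre t htm ev (by simpa using hevm)
  set cnd : List Int → Bool := fun ev => PySem.Set.contains t0 (evCh ev) with hcnd
  set F : List (List Int) := L0.filter cnd with hF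
  set key : List Int → Int := fun e => e.headD 0 with hkey
  -- ==== A side ====
  rw [foldl_flatMap_id, ← hL0,
      PySem.List.foldl_congr_mem L0 _
        (fun (d : PySem.Dict Int (List (List Int))) ev =>
          if cnd ev then d.modify (evCh ev) [] (fun l => l ++ [evProj ev]) else d)
        PySem.Dict.empty (fun d ev hev => by
          obtain ⟨a, b, c, e, f, rfl⟩ := list_len5 (hlen ev hev); rfl),
      ← List.foldl_filter, ← hF]
  have hAfold : F.foldl (fun d ev => d.modify (evCh ev) [] (fun l => l ++ [evProj ev]))
        PySem.Dict.empty
      = (F.map (fun ev => (evCh ev, evProj ev))).foldl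
          (fun d p => d.modify p.1 [] (fun l => l ++ [p.2])) PySem.Dict.empty := by
    rw [List.foldl_map]
  rw [hAfold]
  set dA : PySem.Dict Int (List (List Int)) :=
    (F.map (fun ev => (evCh ev, evProj ev))).foldl
      (fun d p => d.modify p.1 [] (fun l => l ++ [p.2])) PySem.Dict.empty
    with hdA
  have hAget : ∀ c, dA.getD c [] = (F.filter (fun ev => evCh ev == c)).map evProj := by
    intro c
    rw [hdA, PySem.Dict.getD_foldl_modify_append, PySem.Dict.getD_empty, List.nil_append,
        List.filter_map, List.map_map]
    rfl
  have hAkeys : dA.keys = PySem.Set.ofList (F.map evCh) := by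
    rw [hdA]
    rw [show (fun (d : PySem.Dict Int (List (List Int))) (p : Int × List Int) =>
          d.modify p.1 [] (fun l => l ++ [p.2]))
        = fun d p => d.modify (Prod.fst p) [] ((fun (_ : PySem.Dict Int (List (List Int)))
            (p : Int × List Int) (l : List (List Int)) => l ++ [p.2]) d p) from rfl]
    rw [PySem.Dict.keys_foldl_modify_key, PySem.Dict.keys_empty, PySem.Set.update_nil_left,
        List.map_map]
    rfl
  have hAnodup : dA.keys.Nodup := by
    rw [hAkeys]; exact PySem.Set.nodup_ofList _
  -- ==== B side ====
  rw [foldl_flatMap_id, ← hL0,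
      PySem.List.foldl_congr_mem L0 _
        (fun (d : PySem.Dict Int (List (List Int))) ev =>
          if cnd ev then d.modify (evCh ev) [] (insByTick (ev.headD 0) (evProj ev)) else d)
        PySem.Dict.empty (fun d ev hev => by
          rw [if_pos (hlen ev hev)]; rfl),
      ← List.foldl_filter, ← hF]
  set dB : PySem.Dict Int (List (List Int)) :=
    F.foldl (fun d ev => d.modify (evCh ev) [] (insByTick (ev.headD 0) (evProj ev)))
      PySem.Dict.empty with hdB
  have hBget : ∀ c, dB.getD c []
      = (F.filter (fun ev => evCh ev == c)).foldl
          (fun acc ev => insByTick (ev.headD 0) (evProj ev) acc) [] := by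
    intro c
    rw [hdB, getD_foldl_modify_gen F evCh
        (fun ev => insByTick (ev.headD 0) (evProj ev)) PySem.Dict.empty c,
        PySem.Dict.getD_empty]
  have hBkeys : dB.keys = PySem.Set.ofList (F.map evCh) := by
    rw [hdB]
    rw [show (fun (d : PySem.Dict Int (List (List Int))) (ev : List Int) =>
          d.modify (evCh ev) [] (insByTick (ev.headD 0) (evProj ev)))
        = fun d ev => d.modify (evCh ev) [] ((fun (_ : PySem.Dict Int (List (List Int)))
            (ev : List Int) => insByTick (ev.headD 0) (evProj ev)) d ev) from rfl]
    rw [PySem.Dict.keys_foldl_modify_key, PySem.Dict.keys_empty, PySem.Set.update_nil_left]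
  have hBnodup : dB.keys.Nodup := by rw [hBkeys]; exact PySem.Set.nodup_ofList _
  -- ==== the sort loop on the A side ====
  set dA2 : PySem.Dict Int (List (List Int)) :=
    dA.keys.foldl (fun d ch => d.modify ch [] (fun l => PySem.List.sorted l key)) dA with hdA2
  have hA2get : ∀ c ∈ dA.keys, dA2.getD c [] = PySem.List.sorted (dA.getD c []) key := by
    intro c hc
    rw [hdA2, getD_foldl_modify_fun _ _ _ hAnodup, if_pos hc]
  have hA2keys : dA2.keys = dA.keys := by
    rw [hdA2]
    rw [show (fun (d : PySem.Dict Int (List (List Int))) (ch : Int) =>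
          d.modify ch [] (fun l => PySem.List.sorted l key))
        = fun d ch => d.modify (id ch) [] ((fun (_ : PySem.Dict Int (List (List Int))) (_ : Int)
            (l : List (List Int)) => PySem.List.sorted l key) d ch) from rfl]
    rw [PySem.Dict.keys_foldl_modify_key, List.map_id]
    exact update_self_of_forall_mem _ _ (fun x hx => hx)
  have hA2nodup : dA2.keys.Nodup := by rw [hA2keys]; exact hAnodup
  -- ==== items of both sides ====
  rw [PySem.Dict.items_eq_map_keys dA2 hA2nodup [], PySem.Dict.items_eq_map_keys dB hBnodup [],
      hA2keys, hAkeys, hBkeys]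
  refine List.map_congr_left ?_
  intro k hk
  have hkA : k ∈ dA.keys := by rw [hAkeys]; exact hk
  rw [hA2get k hkA, hAget, hBget, foldl_insByTick]
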